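-- pv_equiv track=rewrite | github.com/jeironpro/coding-bat | coding-bat-python/calentamiento2.py | string_splosion
-- ===== SOURCE A (Python) =====
-- def string_splosion(cadena):
--     nueva_cadena = ""
--
--     contador = 1
--     for i in range(len(cadena)):
--         for j in range(0, contador, 1):
--             nueva_cadena += cadena[j]
--         contador += 1
--     return nueva_cadena
-- ===== SOURCE B (Python) =====
-- def string_splosion(cadena):
--     return ''.join(cadena[:i+1] for i in range(len(cadena)))
-- ===== Notes on version B (the rewrite author's own statement) =====
-- stated objective: idiomatic
-- what changed: Replaces the nested per-character concatenation loop (with a manually maintained counter) by a single join over whole-prefix slices.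
import Mathlib
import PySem

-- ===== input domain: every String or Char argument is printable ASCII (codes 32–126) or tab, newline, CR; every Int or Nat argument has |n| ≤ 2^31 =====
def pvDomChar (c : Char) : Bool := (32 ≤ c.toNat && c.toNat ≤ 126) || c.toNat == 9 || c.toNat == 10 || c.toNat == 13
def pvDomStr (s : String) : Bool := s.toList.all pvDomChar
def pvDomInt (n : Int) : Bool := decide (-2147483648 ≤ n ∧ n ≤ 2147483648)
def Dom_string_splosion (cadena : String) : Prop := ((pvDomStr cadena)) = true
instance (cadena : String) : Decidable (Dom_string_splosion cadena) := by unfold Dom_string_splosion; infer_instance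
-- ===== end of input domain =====

-- B replaces A's nested per-character loop by one join over whole-prefix slices (idiomatic).


-- ===== PORT A =====
-- nested loop: for i in range(len), inner loop copies cadena[0..contador); contador starts at 1.
-- cadena[j] is ported as (pyGet? …).toList appended — j is always in range, so this is exact.
def string_splosion (cadena : String) : String :=
  let cs := cadena.toList
  let r := (PySem.List.pyRange 0 (cs.length : Int) 1).foldl
    (fun (st : List Char × Int) _i =>
      ((PySem.List.pyRange 0 st.2 1).foldl
        (fun acc j => acc ++ (PySem.List.pyGet? cs j).toList) st.1,
       st.2 + 1))
    ([], 1)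
  String.ofList r.1

-- ===== PORT B =====
-- ''.join(cadena[:i+1] for i in range(len(cadena))); the slice [:i+1] is List.take (i+1).
def string_splosion_alt (cadena : String) : String :=
  let cs := cadena.toList
  String.ofList (((List.range cs.length).map (fun i => cs.take (i + 1))).flatten)

-- ===== PRECONDITION & SPEC =====
def Spec_string_splosion (cadena : String) (out : String) : Prop := out = string_splosion_alt cadena
instance (cadena : String) (out : String) : Decidable (Spec_string_splosion cadena out) := by unfold Spec_string_splosion; infer_instance

-- ===== CLAIM (what is proved, stated in full; the proofs are below) =====
def Claim_equal_string_splosion : Prop := ∀ (cadena : String), Dom_string_splosion cadena → Spec_string_splosion cadena (string_splosion cadena)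

-- ===== LEMMAS AND PROOFS =====

-- inner loop: copying cadena[0..k) onto acc is acc ++ cs.take k
lemma pv_inner (cs : List Char) (k : Nat) (acc : List Char) :
    (PySem.List.pyRange 0 (k : Int) 1).foldl
      (fun acc j => acc ++ (PySem.List.pyGet? cs j).toList) acc = acc ++ cs.take k := by
  induction k generalizing acc with
  | zero => simp
  | succ k ih =>
    have h : ((k : Int) + 1) = (((k + 1 : Nat)) : Int) := by push_cast; ring
    rw [← h, PySem.List.pyRange_one_succ_right (by positivity), List.foldl_append, ih]
    simp [List.take_add_one]

-- outer loop invariant: processing m indices starting at t with contador = t+1 appends the prefixes t..t+m-1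
lemma pv_outer (cs : List Char) (m : Nat) : ∀ (t : Nat) (acc : List Char),
    (PySem.List.pyRange (t : Int) ((t + m : Nat) : Int) 1).foldl
      (fun (st : List Char × Int) _i =>
        ((PySem.List.pyRange 0 st.2 1).foldl
          (fun acc j => acc ++ (PySem.List.pyGet? cs j).toList) st.1,
         st.2 + 1))
      (acc, (t : Int) + 1)
    = (acc ++ ((List.range' t m).map (fun i => cs.take (i + 1))).flatten, ((t + m : Nat) : Int) + 1) := by
  induction m with
  | zero =>
    intro t acc
    simp [PySem.List.pyRange_one_eq_nil le_rfl]
  | succ m ih =>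
    intro t acc
    have hcons : PySem.List.pyRange (t : Int) ((t + (m + 1) : Nat) : Int) 1
        = (t : Int) :: PySem.List.pyRange (((t + 1 : Nat)) : Int) ((t + 1 + m : Nat) : Int) 1 := by
      rw [PySem.List.pyRange_one_cons (by push_cast; omega)]
      congr 1
      push_cast
      ring_nf
    rw [hcons, List.foldl_cons]
    have h1 : ((t : Int) + 1) = (((t + 1 : Nat)) : Int) := by push_cast; ring
    simp only [h1, pv_inner cs (t + 1)]
    rw [ih (t + 1) (acc ++ cs.take (t + 1))]
    refine Prod.ext ?_ ?_
    · rw [List.range'_succ]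
      simp [List.append_assoc]
    · push_cast; omega

-- ===== VERDICT (by name: the statement is the Claim_ definition above) =====
theorem string_splosion_spec : Claim_equal_string_splosion := by
  intro cadena _
  unfold Spec_string_splosion string_splosion string_splosion_alt
  have h := pv_outer cadena.toList cadena.toList.length 0 []
  simp only [Nat.cast_zero, zero_add] at h
  simp only [h, List.nil_append, List.range_eq_range']
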